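-- pv_equiv track=rewrite | github.com/MrBrantCode/unitest_baseline | mut_generate/mist_train_cf/cf_98289/solution.py | common_keys
-- ===== SOURCE A (Python) =====
-- def common_keys(dicts):
--     if not dicts:
--         return []
--     keys = set(dicts[0].keys())
--     for d in dicts[1:]:
--         keys &= set(d.keys())
--     if not keys:
--         return []
--     return [{k: d[k] for k in keys} for d in dicts if all(k in d for k in keys)]
-- ===== SOURCE B (Python) =====
-- def common_keys(dicts):
--     if not dicts:
--         return []
--     counts = {}
--     for d in dicts:
--         for k in d:
--             counts[k] = counts.get(k, 0) + 1
--     n = len(dicts)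
--     common = [k for k in counts if counts[k] == n]
--     if not common:
--         return []
--     return [{k: d[k] for k in common} for d in dicts]
-- ===== Notes on version B (the rewrite author's own statement) =====
-- stated objective: alternative
-- what changed: Replaces A's progressive set-intersection loop over dicts[1:] (plus the redundant all-keys-present filter in the output comprehension) with a single counting pass over every key of every dict and a count == len(dicts) threshold to find the common keys.
import Mathlib
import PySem

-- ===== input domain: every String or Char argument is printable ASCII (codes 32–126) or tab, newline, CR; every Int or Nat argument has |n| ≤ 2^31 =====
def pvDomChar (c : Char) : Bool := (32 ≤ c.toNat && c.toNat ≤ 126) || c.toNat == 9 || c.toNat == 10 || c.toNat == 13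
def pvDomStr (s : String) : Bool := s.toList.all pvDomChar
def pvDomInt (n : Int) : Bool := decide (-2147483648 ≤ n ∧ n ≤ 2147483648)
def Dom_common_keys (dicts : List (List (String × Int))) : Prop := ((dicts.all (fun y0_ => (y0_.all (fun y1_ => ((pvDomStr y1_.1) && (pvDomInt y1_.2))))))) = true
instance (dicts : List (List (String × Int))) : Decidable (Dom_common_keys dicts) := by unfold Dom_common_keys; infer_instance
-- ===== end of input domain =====

-- B replaces A's progressive set-intersection loop by one counting pass over all keys plus a
-- count-equals-len(dicts) threshold (objective: alternative decomposition, same asymptotic cost).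

-- ===== PORT A =====
def common_keys (dicts : List (List (String × Int))) : List (List (String × Int)) :=
  match dicts with
  | [] => []                                     -- if not dicts: return []
  | d0 :: rest =>
    -- keys = set(dicts[0].keys()); for d in dicts[1:]: keys &= set(d.keys())
    let keys : PySem.Set String :=
      rest.foldl (fun ks d => PySem.Set.inter ks (PySem.Set.ofList (d.map Prod.fst)))
        (PySem.Set.ofList (d0.map Prod.fst))
    if keys = [] then []                         -- if not keys: return []
    else
      -- [{k: d[k] for k in keys} for d in dicts if all(k in d for k in keys)]
      -- d[k]: the filter guarantees k ∈ d's keys, so getD's default 0 is unreachable (no KeyError)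
      ((d0 :: rest).filter (fun d => keys.all (fun k => (d.map Prod.fst).contains k))).map
        (fun d => keys.map (fun k => (k, (PySem.Dict.mk d).getD k 0)))

-- ===== PORT B =====
def common_keys_alt (dicts : List (List (String × Int))) : List (List (String × Int)) :=
  if dicts = [] then []                          -- if not dicts: return []
  else
    -- counts = {}; for d in dicts: for k in d: counts[k] = counts.get(k, 0) + 1
    let counts : PySem.Dict String Int :=
      dicts.foldl (fun c d => (d.map Prod.fst).foldl (fun c k => c.insert k (c.getD k 0 + 1)) c)
        PySem.Dict.empty
    -- common = [k for k in counts if counts[k] == n]   (counts[k]: k ∈ counts, no KeyError)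
    let common : List String :=
      counts.keys.filter (fun k => counts.getD k 0 == (dicts.length : Int))
    if common = [] then []                       -- if not common: return []
    else dicts.map (fun d => common.map (fun k => (k, (PySem.Dict.mk d).getD k 0)))
      -- d[k]: every k ∈ common occurs in every dict, so getD's default 0 is unreachable

-- ===== PRECONDITION & SPEC =====
-- Pre_ excludes inner lists with duplicated keys: they do not represent Python dicts (A's
-- argument type is list[dict]), so no Python input ever reaches A or B in that shape.
def Pre_common_keys (dicts : List (List (String × Int))) : Prop :=
  ∀ d ∈ dicts, (d.map Prod.fst).Nodup
instance (dicts : List (List (String × Int))) : Decidable (Pre_common_keys dicts) := by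
  unfold Pre_common_keys; infer_instance
def pvWitness_common_keys : (List (List (String × Int))) :=
  [[("a", 1), ("b", 2)], [("b", 3), ("a", 4), ("c", 5)]]
def Spec_common_keys (dicts : List (List (String × Int))) (out : List (List (String × Int))) : Prop := out = common_keys_alt dicts
instance (dicts : List (List (String × Int))) (out : List (List (String × Int))) : Decidable (Spec_common_keys dicts out) := by unfold Spec_common_keys; infer_instance

-- ===== CLAIM (what is proved, stated in full; the proofs are below) =====
def Claim_equal_common_keys : Prop := ∀ (dicts : List (List (String × Int))), Dom_common_keys dicts → Pre_common_keys dicts → Spec_common_keys dicts (common_keys dicts)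

-- ===== LEMMAS AND PROOFS =====

-- A's intersection loop is a filter of the accumulator by membership in every remaining dict.
theorem foldl_inter_eq_filter (l : List (List (String × Int))) (s : List String) :
    l.foldl (fun ks d => PySem.Set.inter ks (PySem.Set.ofList (d.map Prod.fst))) s
      = s.filter (fun k => l.all (fun d => (d.map Prod.fst).contains k)) := by
  induction l generalizing s with
  | nil => simp
  | cons d l ih =>
    rw [List.foldl_cons, ih]
    simp only [PySem.Set.inter, PySem.Set.contains, List.filter_filter]
    refine List.filter_congr (fun k _ => ?_)
    simp only [List.all_cons, List.contains_eq_mem, PySem.Set.mem_ofList]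
    rw [Bool.and_comm]

-- B's nested counting loop is Counter(all keys, flattened).
theorem counts_eq_counter (dicts : List (List (String × Int))) :
    dicts.foldl (fun c d => (d.map Prod.fst).foldl (fun c k => c.insert k (c.getD k 0 + 1)) c)
        PySem.Dict.empty
      = PySem.Dict.counter (dicts.flatMap (fun d => d.map Prod.fst)) := by
  rw [← PySem.Dict.foldl_insert_getD_add_one_eq_counter, List.foldl_flatMap]

-- With per-dict Nodup keys, the flattened count of k is the number of dicts containing k.
theorem count_flatMap_eq_countP (dicts : List (List (String × Int))) (k : String)
    (h : ∀ d ∈ dicts, (d.map Prod.fst).Nodup) :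
    (dicts.flatMap (fun d => d.map Prod.fst)).count k
      = dicts.countP (fun d => (d.map Prod.fst).contains k) := by
  induction dicts with
  | nil => simp
  | cons d l ih =>
    have hd := h d (by simp)
    have ih' := ih (fun d hd => h d (by simp [hd]))
    simp only [List.flatMap_cons, List.count_append, List.countP_cons, ih']
    by_cases hk : k ∈ d.map Prod.fst
    · rw [List.count_eq_one_of_mem hd hk]
      simp [hk, Nat.add_comm]
    · rw [List.count_eq_zero_of_not_mem hk]
      simp [hk]

-- A's keys list and B's common list coincide (same elements, same order).
theorem keys_eq_common (d0 : List (String × Int)) (rest : List (List (String × Int)))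
    (h : ∀ d ∈ d0 :: rest, (d.map Prod.fst).Nodup) :
    (PySem.Set.ofList (d0.map Prod.fst)).filter
        (fun k => rest.all (fun d => (d.map Prod.fst).contains k))
      = (PySem.Set.ofList ((d0 :: rest).flatMap (fun d => d.map Prod.fst))).filter
          (fun k => (((d0 :: rest).flatMap (fun d => d.map Prod.fst)).count k : Int)
                      == ((d0 :: rest).length : Int)) := by
  have hd0 : (d0.map Prod.fst).Nodup := h d0 (by simp)
  have hrest : ∀ d ∈ rest, (d.map Prod.fst).Nodup := fun d hd => h d (by simp [hd])
  rw [List.flatMap_cons, PySem.Set.ofList_append, PySem.Set.update_eq_append_filter,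
    List.filter_append]
  have hnil : ((PySem.Set.ofList (rest.flatMap (fun d => d.map Prod.fst))).filter
      (fun y => !(PySem.Set.contains (PySem.Set.ofList (d0.map Prod.fst)) y))).filter
      (fun k => (((d0.map Prod.fst ++ rest.flatMap (fun d => d.map Prod.fst)).count k : Int)
                  == ((d0 :: rest).length : Int))) = [] := by
    rw [List.filter_eq_nil_iff]
    intro k hk
    simp only [List.mem_filter, PySem.Set.contains, Bool.not_eq_eq_eq_not, Bool.not_true,
      List.contains_eq_mem, decide_eq_false_iff_not, PySem.Set.mem_ofList] at hk
    have h0 : (d0.map Prod.fst).count k = 0 := List.count_eq_zero_of_not_mem hk.2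
    have hle : rest.countP (fun d => (d.map Prod.fst).contains k) ≤ rest.length :=
      List.countP_le_length
    rw [List.count_append, h0, count_flatMap_eq_countP rest k hrest]
    simp only [Nat.zero_add, beq_iff_eq, List.length_cons, Int.natCast_inj]
    omega
  rw [hnil, List.append_nil]
  refine List.filter_congr (fun k hk => ?_)
  have hk0 : k ∈ d0.map Prod.fst := (PySem.Set.mem_ofList _ _).1 hk
  have h1 : (d0.map Prod.fst).count k = 1 := List.count_eq_one_of_mem hd0 hk0
  rw [List.count_append, h1, count_flatMap_eq_countP rest k hrest, Bool.eq_iff_iff]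
  simp only [beq_iff_eq, List.length_cons, Int.natCast_inj, List.all_eq_true]
  constructor
  · intro hall
    have h2 := List.countP_eq_length.2 hall
    omega
  · intro hc
    exact List.countP_eq_length.1
      (by omega : rest.countP (fun d => (d.map Prod.fst).contains k) = rest.length)

theorem common_keys_spec : Claim_equal_common_keys := by
  intro dicts _ hpre
  unfold Spec_common_keys
  cases dicts with
  | nil => rfl
  | cons d0 rest =>
    unfold common_keys common_keys_alt
    simp only [if_neg (List.cons_ne_nil d0 rest)]
    rw [foldl_inter_eq_filter, counts_eq_counter, PySem.Dict.keys_counter]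
    have hfilter : (PySem.Set.ofList ((d0 :: rest).flatMap (fun d => d.map Prod.fst))).filter
        (fun k => (PySem.Dict.counter ((d0 :: rest).flatMap (fun d => d.map Prod.fst))).getD k 0
                    == ((d0 :: rest).length : Int))
        = (PySem.Set.ofList ((d0 :: rest).flatMap (fun d => d.map Prod.fst))).filter
            (fun k => (((d0 :: rest).flatMap (fun d => d.map Prod.fst)).count k : Int)
                        == ((d0 :: rest).length : Int)) := by
      refine List.filter_congr (fun k _ => ?_)
      rw [PySem.Dict.getD_counter]
    rw [hfilter, ← keys_eq_common d0 rest hpre]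
    set L := (PySem.Set.ofList (d0.map Prod.fst)).filter
      (fun k => rest.all (fun d => (d.map Prod.fst).contains k)) with hL
    by_cases hnil : L = []
    · simp [hnil]
    · rw [if_neg hnil, if_neg hnil]
      have hmemL : ∀ k ∈ L, ∀ d ∈ d0 :: rest, k ∈ d.map Prod.fst := by
        intro k hk d hd
        rw [hL, List.mem_filter] at hk
        rcases List.mem_cons.1 hd with h | h
        · subst h; exact (PySem.Set.mem_ofList _ _).1 hk.1
        · have := List.all_eq_true.1 hk.2 d h
          simpa [List.contains_iff_mem] using this
      have hself : (d0 :: rest).filter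
          (fun d => L.all (fun k => (d.map Prod.fst).contains k)) = d0 :: rest := by
        rw [List.filter_eq_self]
        intro d hd
        rw [List.all_eq_true]
        intro k hk
        simpa [List.contains_iff_mem] using hmemL k hk d hd
      rw [hself]
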